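-- pv_equiv track=rewrite | github.com/jesopo/irctoolkit | freenode/weechat/maskmatch2.py | _glob_collapse
-- ===== SOURCE A (Python) =====
-- def _glob_collapse(pattern):
--     out = ""
--     i = 0
--     while i < len(pattern):
--         seen_ast = False
--         while pattern[i:] and pattern[i] in ["*", "?"]:
--             if pattern[i] == "?":
--                 out += "?"
--             elif pattern[i] == "*":
--                 seen_ast = True
--             i += 1
--         if seen_ast:
--             out += "*"
--
--         if pattern[i:]:
--             out += pattern[i]
--             i   += 1
--     return out
-- ===== SOURCE B (Python) =====
-- def _glob_collapse(pattern):
--     prev = None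
--     while prev != pattern:
--         prev = pattern
--         pattern = pattern.replace("**", "*").replace("*?", "?*")
--     return pattern
-- ===== Notes on version B (the rewrite author's own statement) =====
-- stated objective: simpler
-- what changed: Replaces A's index-walking state machine (nested while-loops, a seen_ast flag, and a pattern[i:] slice at every step) by a fixpoint string-rewriting loop that repeats pattern.replace('**','*').replace('*?','?*') until the string stops changing, normalising each wildcard run to its '?'s followed by at most one '*'.
import Mathlib
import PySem

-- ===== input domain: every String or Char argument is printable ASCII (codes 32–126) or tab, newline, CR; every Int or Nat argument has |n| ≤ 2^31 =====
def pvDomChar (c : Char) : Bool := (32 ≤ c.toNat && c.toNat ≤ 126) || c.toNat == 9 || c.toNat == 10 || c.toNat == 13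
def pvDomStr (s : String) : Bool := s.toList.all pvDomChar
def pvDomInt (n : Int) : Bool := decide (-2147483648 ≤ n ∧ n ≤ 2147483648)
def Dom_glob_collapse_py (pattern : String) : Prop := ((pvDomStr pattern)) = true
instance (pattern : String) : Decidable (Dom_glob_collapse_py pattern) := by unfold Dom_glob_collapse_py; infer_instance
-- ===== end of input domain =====

-- B replaces A's index-walking state machine by a fixpoint string-rewriting
-- loop — repeat str.replace("**","*") and str.replace("*?","?*") until the
-- string stops changing (objective: simpler — normalisation by rewriting).

-- ===== PORT A =====
-- inner while-loop of A: consumes leading wildcards, appending '?' to out and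
-- flagging '*'; returns (out, seen_ast, remaining characters)
def globAInner : List Char → List Char → Bool → List Char × Bool × List Char
  | [], out, seen => (out, seen, [])
  | c :: cs, out, seen =>
    if c = '?' then globAInner cs (out ++ ['?']) seen
    else if c = '*' then globAInner cs out true
    else (out, seen, c :: cs)

-- the remainder returned by the inner loop is a suffix (needed for termination)
theorem globAInner_len_le : ∀ (l out : List Char) (seen : Bool),
    (globAInner l out seen).2.2.length ≤ l.length := by
  intro l
  induction l with
  | nil => intro out seen; simp [globAInner]
  | cons c cs ih =>
    intro out seen
    by_cases h1 : c = '?'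
    · simpa [globAInner, h1] using Nat.le_succ_of_le (ih (out ++ ['?']) seen)
    · by_cases h2 : c = '*'
      · simpa [globAInner, h1, h2] using Nat.le_succ_of_le (ih out true)
      · simp [globAInner, h1, h2]

-- outer while-loop of A
def globAOuter : List Char → List Char → List Char
  | [], out => out
  | c :: cs, out =>
    let r := globAInner (c :: cs) out false
    let out2 := r.1 ++ (if r.2.1 then ['*'] else [])
    match h : r.2.2 with
    | [] => out2
    | d :: ds => globAOuter ds (out2 ++ [d])
  termination_by l _ => l.length
  decreasing_by
    have hle := globAInner_len_le (c :: cs) out false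
    rw [h] at hle
    simp at hle ⊢
    omega

def glob_collapse_py (pattern : String) : String :=
  String.mk (globAOuter pattern.toList [])

-- ===== PORT B =====
-- pattern.replace("**", "*"): left-to-right scan, a match consumes both chars
def replaceSS : List Char → List Char
  | [] => []
  | [c] => [c]
  | c :: d :: rest =>
    if c = '*' ∧ d = '*' then '*' :: replaceSS rest
    else c :: replaceSS (d :: rest)

-- pattern.replace("*?", "?*"): left-to-right scan, a match consumes both chars
def replaceSQ : List Char → List Char
  | [] => []
  | [c] => [c]
  | c :: d :: rest =>
    if c = '*' ∧ d = '?' then '?' :: '*' :: replaceSQ rest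
    else c :: replaceSQ (d :: rest)

-- termination measure for Source B's while-loop: number of ('*' before '?') inversions
def invM : List Char → Nat
  | [] => 0
  | c :: rest => (if c = '*' then rest.count '?' else 0) + invM rest

theorem SS_len_le : ∀ (l : List Char), (replaceSS l).length ≤ l.length := by
  intro l
  induction l using replaceSS.induct with
  | case1 => simp [replaceSS]
  | case2 c => simp [replaceSS]
  | case3 c d rest h ih =>
    obtain ⟨rfl, rfl⟩ := h
    rw [show replaceSS ('*' :: '*' :: rest) = '*' :: replaceSS rest by simp [replaceSS]]
    simp
    omega
  | case4 c d rest h ih =>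
    rw [show replaceSS (c :: d :: rest) = c :: replaceSS (d :: rest) by
      simp [replaceSS, if_neg h]]
    simpa using ih

theorem SS_eq_or_lt : ∀ (l : List Char),
    replaceSS l = l ∨ (replaceSS l).length < l.length := by
  intro l
  induction l using replaceSS.induct with
  | case1 => left; rfl
  | case2 c => left; rfl
  | case3 c d rest h ih =>
    obtain ⟨rfl, rfl⟩ := h
    right
    have := SS_len_le rest
    rw [show replaceSS ('*' :: '*' :: rest) = '*' :: replaceSS rest by simp [replaceSS]]
    simp
    omega
  | case4 c d rest h ih =>
    rw [show replaceSS (c :: d :: rest) = c :: replaceSS (d :: rest) by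
      simp [replaceSS, if_neg h]]
    rcases ih with h1 | h1
    · left; rw [h1]
    · right; simpa using h1

theorem SQ_len : ∀ (l : List Char), (replaceSQ l).length = l.length := by
  intro l
  induction l using replaceSQ.induct with
  | case1 => rfl
  | case2 c => rfl
  | case3 c d rest h ih =>
    obtain ⟨rfl, rfl⟩ := h
    rw [show replaceSQ ('*' :: '?' :: rest) = '?' :: '*' :: replaceSQ rest by
      simp [replaceSQ]]
    simp [ih]
  | case4 c d rest h ih =>
    rw [show replaceSQ (c :: d :: rest) = c :: replaceSQ (d :: rest) by
      simp [replaceSQ, if_neg h]]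
    simpa using ih

theorem SQ_count : ∀ (l : List Char), (replaceSQ l).count '?' = l.count '?' := by
  intro l
  induction l using replaceSQ.induct with
  | case1 => rfl
  | case2 c => rfl
  | case3 c d rest h ih =>
    obtain ⟨rfl, rfl⟩ := h
    rw [show replaceSQ ('*' :: '?' :: rest) = '?' :: '*' :: replaceSQ rest by
      simp [replaceSQ]]
    simp [List.count_cons, ih]
  | case4 c d rest h ih =>
    rw [show replaceSQ (c :: d :: rest) = c :: replaceSQ (d :: rest) by
      simp [replaceSQ, if_neg h]]
    simp [List.count_cons, ih]

theorem SQ_inv_le : ∀ (l : List Char), invM (replaceSQ l) ≤ invM l := by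
  intro l
  induction l using replaceSQ.induct with
  | case1 => simp [replaceSQ]
  | case2 c => simp [replaceSQ]
  | case3 c d rest h ih =>
    obtain ⟨rfl, rfl⟩ := h
    rw [show replaceSQ ('*' :: '?' :: rest) = '?' :: '*' :: replaceSQ rest by
      simp [replaceSQ]]
    have hcnt := SQ_count rest
    simp [invM, hcnt]
    omega
  | case4 c d rest h ih =>
    rw [show replaceSQ (c :: d :: rest) = c :: replaceSQ (d :: rest) by
      simp [replaceSQ, if_neg h]]
    have hcnt := SQ_count (d :: rest)
    have e1 : invM (c :: replaceSQ (d :: rest))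
        = (if c = '*' then (replaceSQ (d :: rest)).count '?' else 0)
          + invM (replaceSQ (d :: rest)) := rfl
    have e2 : invM (c :: d :: rest)
        = (if c = '*' then (d :: rest).count '?' else 0) + invM (d :: rest) := rfl
    rw [e1, e2, hcnt]
    omega

theorem SQ_eq_or_lt : ∀ (l : List Char),
    replaceSQ l = l ∨ invM (replaceSQ l) < invM l := by
  intro l
  induction l using replaceSQ.induct with
  | case1 => left; rfl
  | case2 c => left; rfl
  | case3 c d rest h ih =>
    obtain ⟨rfl, rfl⟩ := h
    right
    rw [show replaceSQ ('*' :: '?' :: rest) = '?' :: '*' :: replaceSQ rest by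
      simp [replaceSQ]]
    have hcnt := SQ_count rest
    have hle := SQ_inv_le rest
    simp [invM, hcnt]
    omega
  | case4 c d rest h ih =>
    rw [show replaceSQ (c :: d :: rest) = c :: replaceSQ (d :: rest) by
      simp [replaceSQ, if_neg h]]
    have hcnt := SQ_count (d :: rest)
    have e1 : invM (c :: replaceSQ (d :: rest))
        = (if c = '*' then (replaceSQ (d :: rest)).count '?' else 0)
          + invM (replaceSQ (d :: rest)) := rfl
    have e2 : invM (c :: d :: rest)
        = (if c = '*' then (d :: rest).count '?' else 0) + invM (d :: rest) := rfl
    rcases ih with h1 | h1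
    · left; rw [h1]
    · right
      rw [e1, e2, hcnt]
      omega

-- Source B's while-loop: rewrite until a pass changes nothing
def globBLoop (l : List Char) : List Char :=
  if replaceSQ (replaceSS l) = l then l else globBLoop (replaceSQ (replaceSS l))
  termination_by (l.length, invM l)
  decreasing_by
    rcases SS_eq_or_lt l with hss | hss
    · rcases SQ_eq_or_lt l with hsq | hsq
      · exact absurd (show replaceSQ (replaceSS l) = l by rw [hss, hsq]) (by assumption)
      · rw [hss]
        have hlen := SQ_len l
        rw [show ((replaceSQ l).length, invM (replaceSQ l))
            = (l.length, invM (replaceSQ l)) by rw [hlen]]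
        exact Prod.Lex.right _ hsq
    · have : (replaceSQ (replaceSS l)).length < l.length := by rw [SQ_len]; exact hss
      exact Prod.Lex.left _ _ this

def glob_collapse_py_alt (pattern : String) : String :=
  String.mk (globBLoop pattern.toList)

-- ===== PRECONDITION & SPEC =====
def Spec_glob_collapse_py (pattern : String) (out : String) : Prop := out = glob_collapse_py_alt pattern
instance (pattern : String) (out : String) : Decidable (Spec_glob_collapse_py pattern out) := by unfold Spec_glob_collapse_py; infer_instance

-- ===== CLAIM (what is proved, stated in full; the proofs are below) =====
def Claim_equal_glob_collapse_py : Prop := ∀ (pattern : String), Dom_glob_collapse_py pattern → Spec_glob_collapse_py pattern (glob_collapse_py pattern)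

-- ===== LEMMAS AND PROOFS =====

-- functional specification both programs meet: collapse with a buffered
-- wildcard run (qs question marks, star flag)
def globFlush (qs : Nat) (star : Bool) : List Char :=
  List.replicate qs '?' ++ (if star then ['*'] else [])

def fSpec : List Char → Nat → Bool → List Char
  | [], qs, star => globFlush qs star
  | c :: cs, qs, star =>
    if c = '?' then fSpec cs (qs + 1) star
    else if c = '*' then fSpec cs qs true
    else globFlush qs star ++ c :: fSpec cs 0 false

def pvIsWild (c : Char) : Bool := c = '?' || c = '*'

-- A's inner loop characterised via takeWhile/dropWhile on wildcards
theorem globAInner_spec : ∀ (l out : List Char) (seen : Bool),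
    globAInner l out seen =
      (out ++ (l.takeWhile pvIsWild).filter (· = '?'),
       seen || (l.takeWhile pvIsWild).contains '*',
       l.dropWhile pvIsWild) := by
  intro l
  induction l with
  | nil => intro out seen; simp [globAInner]
  | cons c cs ih =>
    intro out seen
    by_cases h1 : c = '?'
    · simp [globAInner, h1, pvIsWild, ih]
    · by_cases h2 : c = '*'
      · simp [globAInner, h2, pvIsWild, ih]
      · simp [globAInner, h1, h2, pvIsWild]

-- fSpec seen through the same run decomposition
theorem fSpec_run : ∀ (l : List Char) (qs : Nat) (star : Bool),
    fSpec l qs star =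
      List.replicate qs '?' ++ (l.takeWhile pvIsWild).filter (· = '?') ++
      (if star || (l.takeWhile pvIsWild).contains '*' then ['*'] else []) ++
      (match l.dropWhile pvIsWild with
       | [] => []
       | d :: ds => d :: fSpec ds 0 false) := by
  intro l
  induction l with
  | nil => intro qs star; simp [fSpec, globFlush]
  | cons c cs ih =>
    intro qs star
    by_cases h1 : c = '?'
    · rw [show fSpec (c :: cs) qs star = fSpec cs (qs + 1) star by simp [fSpec, h1], ih]
      simp [pvIsWild, h1, List.replicate_succ' (n := qs)]
    · by_cases h2 : c = '*'
      · rw [show fSpec (c :: cs) qs star = fSpec cs qs true by simp [fSpec, h2], ih]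
        simp [pvIsWild, h2]
      · simp [fSpec, h1, h2, pvIsWild, globFlush]

-- A's outer loop computes fSpec (strong induction on the remaining length)
theorem globAOuter_eq_fSpec : ∀ (n : Nat) (l : List Char), l.length ≤ n →
    ∀ (out : List Char), globAOuter l out = out ++ fSpec l 0 false := by
  intro n
  induction n with
  | zero =>
    intro l hl out
    have : l = [] := List.eq_nil_of_length_eq_zero (Nat.le_zero.mp hl)
    subst this
    simp [globAOuter, fSpec, globFlush]
  | succ n ih =>
    intro l hl out
    match l with
    | [] => simp [globAOuter, fSpec, globFlush]
    | c :: cs =>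
      rw [globAOuter, globAInner_spec]
      rw [fSpec_run]
      cases hdrop : (c :: cs).dropWhile pvIsWild with
      | nil => simp
      | cons d ds =>
        have hlen : ds.length ≤ n := by
          have h1 := List.length_dropWhile_le (p := pvIsWild) (l := c :: cs)
          rw [hdrop] at h1
          simp at h1 hl
          omega
        simp only [hdrop]
        rw [ih ds hlen]
        simp

-- each rewriting pass preserves the collapsed value
theorem fSpec_SS : ∀ (l : List Char) (qs : Nat) (star : Bool),
    fSpec (replaceSS l) qs star = fSpec l qs star := by
  intro l
  induction l using replaceSS.induct with
  | case1 => intro qs star; rfl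
  | case2 c => intro qs star; rfl
  | case3 c d rest h ih =>
    intro qs star
    obtain ⟨rfl, rfl⟩ := h
    rw [show replaceSS ('*' :: '*' :: rest) = '*' :: replaceSS rest by simp [replaceSS]]
    rw [show fSpec ('*' :: replaceSS rest) qs star = fSpec (replaceSS rest) qs true by
      simp [fSpec]]
    rw [ih]
    simp [fSpec]
  | case4 c d rest h ih =>
    intro qs star
    rw [show replaceSS (c :: d :: rest) = c :: replaceSS (d :: rest) by
      simp [replaceSS, if_neg h]]
    by_cases h1 : c = '?'
    · subst h1; simp only [fSpec, if_pos rfl]; exact ih _ _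
    · by_cases h2 : c = '*'
      · subst h2; simp [fSpec, h1, ih]
      · simp [fSpec, h1, h2, ih]

theorem fSpec_SQ : ∀ (l : List Char) (qs : Nat) (star : Bool),
    fSpec (replaceSQ l) qs star = fSpec l qs star := by
  intro l
  induction l using replaceSQ.induct with
  | case1 => intro qs star; rfl
  | case2 c => intro qs star; rfl
  | case3 c d rest h ih =>
    intro qs star
    obtain ⟨rfl, rfl⟩ := h
    rw [show replaceSQ ('*' :: '?' :: rest) = '?' :: '*' :: replaceSQ rest by
      simp [replaceSQ]]
    rw [show fSpec ('?' :: '*' :: replaceSQ rest) qs star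
        = fSpec (replaceSQ rest) (qs + 1) true by simp [fSpec]]
    rw [ih]
    simp [fSpec]
  | case4 c d rest h ih =>
    intro qs star
    rw [show replaceSQ (c :: d :: rest) = c :: replaceSQ (d :: rest) by
      simp [replaceSQ, if_neg h]]
    by_cases h1 : c = '?'
    · subst h1; simp only [fSpec, if_pos rfl]; exact ih _ _
    · by_cases h2 : c = '*'
      · subst h2; simp [fSpec, h1, ih]
      · simp [fSpec, h1, h2, ih]

-- a fixpoint of the combined pass is a fixpoint of each pass
theorem SS_fix_of_eq (l : List Char) (h : replaceSQ (replaceSS l) = l) :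
    replaceSS l = l ∧ replaceSQ l = l := by
  rcases SS_eq_or_lt l with hss | hss
  · exact ⟨hss, by rwa [hss] at h⟩
  · exfalso
    have hlen : (replaceSQ (replaceSS l)).length = l.length := by rw [h]
    rw [SQ_len] at hlen
    omega

-- fixpoint tails are fixpoints
theorem SS_fix_tail (c d : Char) (rest : List Char)
    (h : replaceSS (c :: d :: rest) = c :: d :: rest) :
    replaceSS (d :: rest) = d :: rest := by
  by_cases hcd : c = '*' ∧ d = '*'
  · exfalso
    obtain ⟨rfl, rfl⟩ := hcd
    have hle := SS_len_le rest
    have hlen : (replaceSS ('*' :: '*' :: rest)).length = ('*' :: '*' :: rest).length := by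
      rw [h]
    rw [show replaceSS ('*' :: '*' :: rest) = '*' :: replaceSS rest by
      simp [replaceSS]] at hlen
    simp at hlen
    omega
  · rw [show replaceSS (c :: d :: rest) = c :: replaceSS (d :: rest) by
      simp [replaceSS, if_neg hcd]] at h
    simpa using h

theorem SQ_fix_tail (c d : Char) (rest : List Char)
    (h : replaceSQ (c :: d :: rest) = c :: d :: rest) :
    replaceSQ (d :: rest) = d :: rest := by
  by_cases hcd : c = '*' ∧ d = '?'
  · exfalso
    obtain ⟨rfl, rfl⟩ := hcd
    rw [show replaceSQ ('*' :: '?' :: rest) = '?' :: '*' :: replaceSQ rest by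
      simp [replaceSQ]] at h
    simp at h
  · rw [show replaceSQ (c :: d :: rest) = c :: replaceSQ (d :: rest) by
      simp [replaceSQ, if_neg hcd]] at h
    simpa using h

-- a joint fixpoint of both passes is its own collapse
theorem fix_fSpec : ∀ (l : List Char), replaceSS l = l → replaceSQ l = l →
    ∀ (qs : Nat) (star : Bool),
    (star = true → l.head? ≠ some '*' ∧ l.head? ≠ some '?') →
    fSpec l qs star = List.replicate qs '?' ++ (if star then ['*'] else []) ++ l := by
  intro l
  induction l with
  | nil => intro _ _ qs star _; simp [fSpec, globFlush]
  | cons c cs ih =>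
    intro hss hsq qs star hstar
    by_cases h1 : c = '?'
    · subst h1
      have hstar' : star = false := by
        cases star
        · rfl
        · exact absurd rfl (hstar rfl).2
      subst hstar'
      cases cs with
      | nil => simp [fSpec, globFlush, List.replicate_succ' (n := qs)]
      | cons d ds =>
        rw [show fSpec ('?' :: d :: ds) qs false = fSpec (d :: ds) (qs + 1) false by
          simp [fSpec]]
        rw [ih (SS_fix_tail _ _ _ hss) (SQ_fix_tail _ _ _ hsq) (qs + 1) false (by simp)]
        simp [List.replicate_succ' (n := qs)]
    · by_cases h2 : c = '*'
      · subst h2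
        have hstar' : star = false := by
          cases star
          · rfl
          · exact absurd rfl (hstar rfl).1
        subst hstar'
        cases cs with
        | nil => simp [fSpec, globFlush]
        | cons d ds =>
          have hd1 : d ≠ '*' := by
            intro hd; subst hd
            have hle := SS_len_le ds
            have hlen : (replaceSS ('*' :: '*' :: ds)).length
                = ('*' :: '*' :: ds).length := by rw [hss]
            rw [show replaceSS ('*' :: '*' :: ds) = '*' :: replaceSS ds by
              simp [replaceSS]] at hlen
            simp at hlen
            omega
          have hd2 : d ≠ '?' := by
            intro hd; subst hd
            rw [show replaceSQ ('*' :: '?' :: ds) = '?' :: '*' :: replaceSQ ds by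
              simp [replaceSQ]] at hsq
            simp at hsq
          rw [show fSpec ('*' :: d :: ds) qs false = fSpec (d :: ds) qs true by
            simp [fSpec, hd1]]
          rw [ih (SS_fix_tail _ _ _ hss) (SQ_fix_tail _ _ _ hsq) qs true
            (by intro _; simp [hd1, hd2])]
          simp
      · have hss' : replaceSS cs = cs := by
          cases cs with
          | nil => rfl
          | cons d ds => exact SS_fix_tail _ _ _ hss
        have hsq' : replaceSQ cs = cs := by
          cases cs with
          | nil => rfl
          | cons d ds => exact SQ_fix_tail _ _ _ hsq
        rw [show fSpec (c :: cs) qs star = globFlush qs star ++ c :: fSpec cs 0 false by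
          simp [fSpec, h1, h2]]
        rw [ih hss' hsq' 0 false (by simp)]
        simp [globFlush]

-- B's rewriting loop computes fSpec
theorem globBLoop_eq_fSpec : ∀ (l : List Char), globBLoop l = fSpec l 0 false := by
  intro l
  induction l using globBLoop.induct with
  | case1 l h =>
    rw [globBLoop, if_pos h]
    obtain ⟨hss, hsq⟩ := SS_fix_of_eq l h
    rw [fix_fSpec l hss hsq 0 false (by simp)]
    simp
  | case2 l h ih =>
    rw [globBLoop, if_neg h]
    rw [ih, fSpec_SQ, fSpec_SS]

-- ===== VERDICT (by name: the statement is the Claim_ definition above) =====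
theorem glob_collapse_py_spec : Claim_equal_glob_collapse_py := by
  intro pattern _
  unfold Spec_glob_collapse_py glob_collapse_py glob_collapse_py_alt
  rw [globAOuter_eq_fSpec pattern.toList.length pattern.toList (Nat.le_refl _)]
  rw [globBLoop_eq_fSpec]
  simp
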